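-- pv_equiv track=rewrite | github.com/dusenkot/J-zyki-i-paradygmaty-programowania | Lab1/Zadanie3.py | optymalizacja_proceduralna
-- ===== SOURCE A (Python) =====
-- def optymalizacja_proceduralna(zadania):
--     zadania.sort(key=lambda x: x[1])  # x[1] to czas wykonania
--     czas_oczkiwania = 0
--     calkowity_czas = 0
--     optymalna_kolejnosc = []
--     for zadanie in zadania:
--         czas_oczkiwania += zadanie[1]
--         calkowity_czas += czas_oczkiwania
--         optymalna_kolejnosc.append(zadanie)
--     return optymalna_kolejnosc, calkowity_czas
-- ===== SOURCE B (Python) =====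
-- def optymalizacja_proceduralna(zadania):
--     zadania.sort(key=lambda x: x[1])
--     n = len(zadania)
--     calkowity_czas = sum((n - i) * z[1] for i, z in enumerate(zadania))
--     optymalna_kolejnosc = list(zadania)
--     return optymalna_kolejnosc, calkowity_czas
-- ===== Notes on version B (the rewrite author's own statement) =====
-- stated objective: simpler
-- what changed: Replaces the running waiting-time accumulator loop (which also rebuilds the list element by element) with a closed positional weighted sum sum((n-i)*t_i) over the sorted list plus a plain list copy.
import Mathlib
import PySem

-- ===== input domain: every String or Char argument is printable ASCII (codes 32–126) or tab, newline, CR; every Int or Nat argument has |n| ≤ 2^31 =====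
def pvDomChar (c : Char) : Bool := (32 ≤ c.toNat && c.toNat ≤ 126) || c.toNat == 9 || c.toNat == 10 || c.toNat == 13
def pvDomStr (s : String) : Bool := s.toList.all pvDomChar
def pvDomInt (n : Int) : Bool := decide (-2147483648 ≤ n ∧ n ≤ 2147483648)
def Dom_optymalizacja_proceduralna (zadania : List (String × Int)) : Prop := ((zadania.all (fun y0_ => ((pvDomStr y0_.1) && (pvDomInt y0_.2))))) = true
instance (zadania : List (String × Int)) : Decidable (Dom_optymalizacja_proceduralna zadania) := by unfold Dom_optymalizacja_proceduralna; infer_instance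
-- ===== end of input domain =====

-- B replaces A's running-waiting-time accumulator loop by a closed positional weighted sum
-- over the sorted list (objective: simpler). Both sort the argument in place in Python; the
-- equivalence proved here is about the return value.

-- ===== PORT A =====
def optymalizacja_proceduralna (zadania : List (String × Int)) : (List (String × Int)) × Int :=
  let z := PySem.List.sorted zadania (fun x => x.2) false
  let st := z.foldl
    (fun (st : Int × Int × List (String × Int)) zadanie =>
      let czas := st.1 + zadanie.2
      (czas, st.2.1 + czas, st.2.2 ++ [zadanie]))
    (0, 0, [])
  (st.2.2, st.2.1)

-- ===== PORT B =====
def optymalizacja_proceduralna_alt (zadania : List (String × Int)) : (List (String × Int)) × Int :=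
  let z := PySem.List.sorted zadania (fun x => x.2) false
  let n : Int := z.length
  let calkowity_czas :=
    (PySem.List.enumerate z 0).foldl (fun acc p => acc + (n - p.1) * p.2.2) 0
  (z, calkowity_czas)

-- ===== PRECONDITION & SPEC =====
def Spec_optymalizacja_proceduralna (zadania : List (String × Int)) (out : (List (String × Int)) × Int) : Prop := out = optymalizacja_proceduralna_alt zadania
instance (zadania : List (String × Int)) (out : (List (String × Int)) × Int) : Decidable (Spec_optymalizacja_proceduralna zadania out) := by unfold Spec_optymalizacja_proceduralna; infer_instance

-- ===== CLAIM (what is proved, stated in full; the proofs are below) =====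
def Claim_equal_optymalizacja_proceduralna : Prop := ∀ (zadania : List (String × Int)), Dom_optymalizacja_proceduralna zadania → Spec_optymalizacja_proceduralna zadania (optymalizacja_proceduralna zadania)

-- ===== LEMMAS AND PROOFS =====

-- sum of execution times
def pvT (l : List (String × Int)) : Int := l.foldr (fun z a => z.2 + a) 0

-- weighted sum Σ (len - i) * t_i, recursively
def pvW (l : List (String × Int)) : Int :=
  match l with
  | [] => 0
  | z :: r => z.2 * ((r.length : Int) + 1) + pvW r

theorem pvFoldA (l : List (String × Int)) :
    ∀ (c acc : Int) (lst : List (String × Int)),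
      l.foldl (fun (st : Int × Int × List (String × Int)) zadanie =>
          let czas := st.1 + zadanie.2
          (czas, st.2.1 + czas, st.2.2 ++ [zadanie])) (c, acc, lst)
      = (c + pvT l, acc + (l.length : Int) * c + pvW l, lst ++ l) := by
  induction l with
  | nil => intro c acc lst; simp [pvT, pvW]
  | cons z r ih =>
    intro c acc lst
    simp only [List.foldl_cons, ih, pvT, pvW, List.foldr_cons, List.length_cons]
    simp only [Prod.mk.injEq]
    refine ⟨by ring, by push_cast; ring, by simp⟩

theorem pvFoldB (l : List (String × Int)) (n : Int) :
    ∀ (s a : Int),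
      (PySem.List.enumerate l s).foldl (fun acc p => acc + (n - p.1) * p.2.2) a
      = a + (n - s - (l.length : Int)) * pvT l + pvW l := by
  induction l with
  | nil => intro s a; simp [PySem.List.enumerate_nil, pvT, pvW]
  | cons z r ih =>
    intro s a
    simp only [PySem.List.enumerate_cons, List.foldl_cons, ih, pvT, pvW,
      List.foldr_cons, List.length_cons]
    push_cast
    ring

-- ===== VERDICT (by name: the statement is the Claim_ definition above) =====
theorem optymalizacja_proceduralna_spec : Claim_equal_optymalizacja_proceduralna := by
  intro zadania _
  unfold Spec_optymalizacja_proceduralna optymalizacja_proceduralna optymalizacja_proceduralna_alt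
  set z := PySem.List.sorted zadania (fun x => x.2) false with hz
  simp only [pvFoldA, pvFoldB]
  simp only [Prod.mk.injEq]
  exact ⟨by simp, by ring⟩
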